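-- pv_equiv track=rewrite | github.com/brhubbar/aoc-2023-py | aoc2023/day15.py | part1
-- ===== SOURCE A (Python) =====
-- def part1(data: str) -> int:
--     data = data.strip()
--     total = 0
--     for step in data.split(","):
--         hash_ = 0
--         for c in step:
--             hash_ += ord(c)
--             hash_ *= 17
--             hash_ = hash_ % 256
--         total += hash_
--     return total
-- ===== SOURCE B (Python) =====
-- def part1(data: str) -> int:
--     # One flat pass over the stripped input: running hash per segment, flush on ','.
--     total = 0
--     hash_ = 0
--     for c in data.strip():
--         if c == ',':
--             total += hash_
--             hash_ = 0
--         else: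
--             hash_ = (hash_ + ord(c)) * 17 % 256
--     return total + hash_
-- ===== Notes on version B (the rewrite author's own statement) =====
-- stated objective: alternative
-- what changed: Replaced the split-into-segments outer loop with inner per-character loop by a single flat pass over the stripped string that keeps a running hash and total and flushes the hash at each comma.
import Mathlib
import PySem

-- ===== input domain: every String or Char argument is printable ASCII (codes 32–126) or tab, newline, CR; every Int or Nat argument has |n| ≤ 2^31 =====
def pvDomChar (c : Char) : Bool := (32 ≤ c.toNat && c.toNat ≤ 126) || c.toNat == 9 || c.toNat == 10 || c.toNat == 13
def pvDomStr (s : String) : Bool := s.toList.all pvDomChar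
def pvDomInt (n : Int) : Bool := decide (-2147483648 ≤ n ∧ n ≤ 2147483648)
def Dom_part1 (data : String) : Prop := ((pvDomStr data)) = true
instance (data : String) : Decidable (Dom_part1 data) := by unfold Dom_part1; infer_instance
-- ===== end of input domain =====

-- B replaces A's split-then-hash nested loops by one flat pass over the stripped
-- string with a running (hash, total) state flushed at each comma (alternative decomposition).


-- ===== PORT A =====
-- transliteration of A: strip, split on ",", per-segment inner hash loop, add to total
def part1 (data : String) : Int :=
  let d := PySem.Str.strip data
  (PySem.Chars.splitOn d.toList [',']).foldl
    (fun total step =>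
      total + step.foldl
        (fun hash_ c => PySem.Int.mod ((hash_ + (c.toNat : Int)) * 17) 256) 0)
    0

-- ===== PORT B =====
-- transliteration of B: one pass over the stripped string, (hash_, total) state
def part1_alt (data : String) : Int :=
  let p := (PySem.Str.strip data).toList.foldl
    (fun (st : Int × Int) c =>
      if c = ',' then (0, st.2 + st.1)
      else (PySem.Int.mod ((st.1 + (c.toNat : Int)) * 17) 256, st.2))
    (0, 0)
  p.2 + p.1

-- ===== PRECONDITION & SPEC =====
def Spec_part1 (data : String) (out : Int) : Prop := out = part1_alt data
instance (data : String) (out : Int) : Decidable (Spec_part1 data out) := by unfold Spec_part1; infer_instance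

-- ===== CLAIM (what is proved, stated in full; the proofs are below) =====
def Claim_equal_part1 : Prop := ∀ (data : String), Dom_part1 data → Spec_part1 data (part1 data)

-- ===== LEMMAS AND PROOFS =====

-- the one-character hash update both programs perform
def pvStep (h : Int) (c : Char) : Int := PySem.Int.mod ((h + (c.toNat : Int)) * 17) 256

-- hash of one segment (A's inner loop)
def pvHash (l : List Char) : Int := l.foldl pvStep 0

-- sum of the hashes of a list of segments
def pvSum (segs : List (List Char)) : Int := (segs.map pvHash).sum

-- simple recursive spec: total contributed by the remaining characters,
-- given the running hash of the current segment
def pvS : List Char → Int → Int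
  | [], h => h
  | c :: rest, h => if c = ',' then h + pvS rest 0 else pvS rest (pvStep h c)

theorem pvHash_snoc (l : List Char) (c : Char) :
    pvHash (l ++ [c]) = pvStep (pvHash l) c := by
  simp [pvHash]

theorem pvGo_sum (fuel : Nat) : ∀ (l cur : List Char) (acc : List (List Char)),
    l.length ≤ fuel →
    pvSum (PySem.Chars.splitOn.go [','] fuel l cur acc)
      = pvSum acc + pvS l (pvHash cur.reverse) := by
  induction fuel with
  | zero =>
    intro l cur acc hl
    have : l = [] := List.eq_nil_of_length_eq_zero (Nat.le_zero.mp hl)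
    subst this
    simp [PySem.Chars.splitOn.go, pvSum, pvS, add_comm]
  | succ fuel ih =>
    intro l cur acc hl
    cases l with
    | nil =>
      simp [PySem.Chars.splitOn.go, pvSum, pvS, add_comm]
    | cons c rest =>
      by_cases hc : c = ','
      · subst hc
        have hpre : List.isPrefixOf [','] (',' :: rest) = true := by
          simp [List.isPrefixOf]
        rw [PySem.Chars.splitOn.go]
        simp only [hpre, if_pos, List.length_cons, List.drop_succ_cons]
        rw [show List.drop (List.length ([] : List Char)) rest = rest from by simp]
        rw [ih rest [] (cur.reverse :: acc) (by simpa using Nat.lt_succ_iff.mp (by simpa using hl))]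
        simp [pvSum, pvS, pvHash]
        ring
      · have hpre : List.isPrefixOf [','] (c :: rest) = false := by
          simp [List.isPrefixOf]
          exact fun h => hc h.symm
        rw [PySem.Chars.splitOn.go]
        simp only [hpre, Bool.false_eq_true, if_false]
        rw [ih rest (c :: cur) acc (by simpa using Nat.lt_succ_iff.mp (by simpa using hl))]
        have : pvHash ((c :: cur).reverse) = pvStep (pvHash cur.reverse) c := by
          simp [pvHash_snoc]
        rw [this]
        simp [pvS, hc]

theorem pvA_eq (l : List Char) :
    (PySem.Chars.splitOn l [',']).foldl
        (fun total step =>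
          total + step.foldl (fun h c => PySem.Int.mod ((h + (c.toNat : Int)) * 17) 256) 0) 0
      = pvS l 0 := by
  have hfold : ∀ (segs : List (List Char)) (t : Int),
      segs.foldl (fun total step =>
        total + step.foldl (fun h c => PySem.Int.mod ((h + (c.toNat : Int)) * 17) 256) 0) t
        = t + pvSum segs := by
    intro segs
    induction segs with
    | nil => intro t; simp [pvSum]
    | cons s ss ihs =>
      intro t
      simp only [List.foldl_cons, ihs, pvSum, List.map_cons, List.sum_cons]
      have : s.foldl (fun h c => PySem.Int.mod ((h + (c.toNat : Int)) * 17) 256) 0 = pvHash s := rfl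
      rw [this]; ring
  rw [hfold]
  rw [show PySem.Chars.splitOn l [','] = PySem.Chars.splitOn.go [','] (l.length + 1) l [] [] from rfl]
  rw [pvGo_sum (l.length + 1) l [] [] (Nat.le_succ _)]
  simp [pvSum, pvHash]

theorem pvB_eq (l : List Char) : ∀ (h t : Int),
    (l.foldl
      (fun (st : Int × Int) c =>
        if c = ',' then (0, st.2 + st.1)
        else (PySem.Int.mod ((st.1 + (c.toNat : Int)) * 17) 256, st.2)) (h, t)).2
    + (l.foldl
      (fun (st : Int × Int) c =>
        if c = ',' then (0, st.2 + st.1)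
        else (PySem.Int.mod ((st.1 + (c.toNat : Int)) * 17) 256, st.2)) (h, t)).1
    = t + pvS l h := by
  induction l with
  | nil => intro h t; simp [pvS, add_comm]
  | cons c rest ihl =>
    intro h t
    by_cases hc : c = ','
    · subst hc
      simp only [List.foldl_cons, if_pos]
      rw [ihl 0 (t + h)]
      simp [pvS]; ring
    · simp only [List.foldl_cons, if_neg hc]
      rw [ihl]
      simp [pvS, hc, pvStep]

-- ===== VERDICT (by name: the statement is the Claim_ definition above) =====
theorem part1_spec : Claim_equal_part1 := by
  intro data _
  unfold Spec_part1 part1 part1_alt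
  rw [pvA_eq, pvB_eq]
  simp
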